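-- pv_equiv track=rewrite | github.com/MrChepe09/Competitive-Programming-Codes | Codechef May LunchTime 2020/WWALK.py | weirdwalk
-- ===== SOURCE A (Python) =====
-- def weirdwalk(n, a, b):
--   alice = 0
--   bob = 0
--   total = 0
--   for i in range(n):
--     if((a[i]==b[i]) and (alice==bob)):
--       total+=a[i]
--     alice+=a[i]
--     bob+=b[i]
--   return total
-- ===== SOURCE B (Python) =====
-- def weirdwalk(n, a, b):
--     m = max(n, 0)
--     # phase 1: prefix-sum tables; pa[i]/pb[i] = sum of the first i elements
--     pa = [0]
--     sa = 0
--     for x in a[:m]: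
--         sa += x
--         pa.append(sa)
--     pb = [0]
--     sb = 0
--     for y in b[:m]:
--         sb += y
--         pb.append(sb)
--     # phase 2: filtering scan over the tables
--     return sum(a[i] for i in range(m) if pa[i] == pb[i] and a[i] == b[i])
-- ===== Notes on version B (the rewrite author's own statement) =====
-- stated objective: alternative
-- what changed: A interleaves running sums and the total in one stateful loop; B first builds two prefix-sum tables pa/pb over a[:n] and b[:n] in separate passes and then computes the answer as a stateless filtered sum over the tables.
import Mathlib
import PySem

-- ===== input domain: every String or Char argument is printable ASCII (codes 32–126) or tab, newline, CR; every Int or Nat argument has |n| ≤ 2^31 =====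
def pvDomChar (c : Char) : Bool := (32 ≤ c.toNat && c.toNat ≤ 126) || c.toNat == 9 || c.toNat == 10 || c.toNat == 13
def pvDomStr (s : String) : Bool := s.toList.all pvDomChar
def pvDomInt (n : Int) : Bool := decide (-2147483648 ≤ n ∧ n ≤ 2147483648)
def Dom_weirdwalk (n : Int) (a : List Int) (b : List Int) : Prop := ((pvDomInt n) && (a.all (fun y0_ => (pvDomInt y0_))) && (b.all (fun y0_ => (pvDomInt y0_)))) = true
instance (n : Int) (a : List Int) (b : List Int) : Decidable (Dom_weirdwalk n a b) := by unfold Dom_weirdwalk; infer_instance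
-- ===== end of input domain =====

-- B replaces A's single interleaved stateful loop by two prefix-sum table passes plus a
-- separate filtering scan (alternative decomposition, same O(n) cost).


-- ===== PORT A =====
-- A: one loop over range(n) carrying (alice, bob, total); pyGetD is exact under Pre_ (index in range).
def weirdwalk (n : Int) (a : List Int) (b : List Int) : Int :=
  ((PySem.List.pyRange 0 n 1).foldl (fun (s : Int × Int × Int) i =>
    let ai := PySem.List.pyGetD a i 0
    let bi := PySem.List.pyGetD b i 0
    let tot := if ai = bi ∧ s.1 = s.2.1 then s.2.2 + ai else s.2.2
    (s.1 + ai, s.2.1 + bi, tot)) (0, 0, 0)).2.2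

-- ===== PORT B =====
-- B: build prefix tables pa, pb over a[:m], b[:m] (append loop carrying the running sum),
-- then a filtered sum over range(m) reading the tables.
def weirdwalk_alt (n : Int) (a : List Int) (b : List Int) : Int :=
  (((PySem.List.pyRange 0 (max n 0) 1).filter (fun i =>
      PySem.List.pyGetD
        (((PySem.List.slice a none (some (max n 0))).foldl
          (fun (p : List Int × Int) x => (p.1 ++ [p.2 + x], p.2 + x)) ([0], 0)).1) i 0 ==
      PySem.List.pyGetD
        (((PySem.List.slice b none (some (max n 0))).foldl
          (fun (p : List Int × Int) y => (p.1 ++ [p.2 + y], p.2 + y)) ([0], 0)).1) i 0 &&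
      PySem.List.pyGetD a i 0 == PySem.List.pyGetD b i 0)).map
    (fun i => PySem.List.pyGetD a i 0)).sum

-- ===== PRECONDITION & SPEC =====
-- Pre_ excludes exactly the inputs where Python A raises IndexError: n > len(a) or n > len(b).
def Pre_weirdwalk (n : Int) (a : List Int) (b : List Int) : Prop :=
  n ≤ (a.length : Int) ∧ n ≤ (b.length : Int)
instance (n : Int) (a : List Int) (b : List Int) : Decidable (Pre_weirdwalk n a b) := by unfold Pre_weirdwalk; infer_instance
def pvWitness_weirdwalk : Int × List Int × List Int := (3, [1, -1, 2], [1, 0, 2])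

def Spec_weirdwalk (n : Int) (a : List Int) (b : List Int) (out : Int) : Prop := out = weirdwalk_alt n a b
instance (n : Int) (a : List Int) (b : List Int) (out : Int) : Decidable (Spec_weirdwalk n a b out) := by unfold Spec_weirdwalk; infer_instance

-- ===== CLAIM (what is proved, stated in full; the proofs are below) =====
def Claim_equal_weirdwalk : Prop := ∀ (n : Int) (a : List Int) (b : List Int), Dom_weirdwalk n a b → Pre_weirdwalk n a b → Spec_weirdwalk n a b (weirdwalk n a b)

-- ===== LEMMAS AND PROOFS =====

-- the semantic filter condition: prefix sums before i agree and the i-th elements agree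
def pvSem (a b : List Int) (i : Int) : Bool :=
  (((a.take i.toNat).sum : Int) == (b.take i.toNat).sum) &&
  (PySem.List.pyGetD a i 0 == PySem.List.pyGetD b i 0)

-- the prefix-table append loop, characterised
theorem pvPrefixFold (l : List Int) (acc : List Int) (s : Int) :
    l.foldl (fun (p : List Int × Int) x => (p.1 ++ [p.2 + x], p.2 + x)) (acc, s)
      = (acc ++ (List.range l.length).map (fun k => s + (l.take (k + 1)).sum), s + l.sum) := by
  induction l generalizing acc s with
  | nil => simp
  | cons x xs ih =>
      simp only [List.foldl_cons, ih, Prod.mk.injEq]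
      constructor
      · rw [List.length_cons, List.range_succ_eq_map]
        simp [List.map_map, Function.comp, List.append_assoc, add_assoc]
      · simp [add_assoc]

-- reading the table: entry i of pa is the sum of the first i elements
theorem pvTableGet (l : List Int) (i : Nat) (hi : i ≤ l.length) :
    PySem.List.pyGetD
      ((l.foldl (fun (p : List Int × Int) x => (p.1 ++ [p.2 + x], p.2 + x)) ([0], 0)).1)
      (i : Int) 0 = (l.take i).sum := by
  rw [pvPrefixFold]
  simp only [PySem.List.pyGetD_natCast]
  cases i with
  | zero => simp
  | succ j =>
      have hj : j < l.length := by omega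
      rw [List.getD_eq_getElem?_getD]
      simp [List.getElem?_map, List.getElem?_range hj]

-- A's fold over range(M), characterised against the semantic condition
theorem pvFoldA (a b : List Int) (M : Nat) (hA : M ≤ a.length) (hB : M ≤ b.length) :
    (PySem.List.pyRange 0 (M : Int) 1).foldl (fun (s : Int × Int × Int) i =>
      let ai := PySem.List.pyGetD a i 0
      let bi := PySem.List.pyGetD b i 0
      let tot := if ai = bi ∧ s.1 = s.2.1 then s.2.2 + ai else s.2.2
      (s.1 + ai, s.2.1 + bi, tot)) (0, 0, 0)
    = ((a.take M).sum, (b.take M).sum,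
       (((PySem.List.pyRange 0 (M : Int) 1).filter (pvSem a b)).map
          (fun i => PySem.List.pyGetD a i 0)).sum) := by
  induction M with
  | zero => simp [PySem.List.pyRange_one_eq_nil]
  | succ M ih =>
      have hA' : M ≤ a.length := by omega
      have hB' : M ≤ b.length := by omega
      have hstep : ((M : Int) + 1) = ((M + 1 : Nat) : Int) := by push_cast; ring
      rw [← hstep, PySem.List.pyRange_one_succ_right (by positivity),
          List.foldl_append, List.filter_append, List.map_append, List.sum_append,
          ih hA' hB']
      have hga : PySem.List.pyGetD a (M : Int) 0 = a[M]'(by omega) := by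
        rw [PySem.List.pyGetD_natCast]; exact List.getD_eq_getElem _ _ (by omega)
      have hgb : PySem.List.pyGetD b (M : Int) 0 = b[M]'(by omega) := by
        rw [PySem.List.pyGetD_natCast]; exact List.getD_eq_getElem _ _ (by omega)
      have hta : (a.take (M + 1)).sum = (a.take M).sum + a[M]'(by omega) := by
        rw [List.sum_take_succ _ _ (by omega)]
      have htb : (b.take (M + 1)).sum = (b.take M).sum + b[M]'(by omega) := by
        rw [List.sum_take_succ _ _ (by omega)]
      simp only [List.foldl_cons, List.foldl_nil, pvSem, List.filter_cons, List.filter_nil,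
        Int.toNat_natCast, hga, hgb]
      by_cases hc : a[M]'(by omega) = b[M]'(by omega) ∧ (a.take M).sum = (b.take M).sum
      · rw [if_pos hc]
        have : ((((a.take M).sum : Int) == (b.take M).sum) &&
            (a[M]'(by omega) == b[M]'(by omega))) = true := by
          simp [hc.1, hc.2]
        rw [this]
        simp [hta, htb, hga, hc.1, hc.2]
      · rw [if_neg hc]
        have : ((((a.take M).sum : Int) == (b.take M).sum) &&
            (a[M]'(by omega) == b[M]'(by omega))) = false := by
          simp only [Bool.and_eq_false_iff, beq_eq_false_iff_ne]
          tauto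
        rw [this]
        simp [hta, htb]

-- B's filter condition equals the semantic one on the range (the tables hold prefix sums there)
theorem pvAltEq (a b : List Int) (m : Int) (hm : 0 ≤ m)
    (hA : m ≤ (a.length : Int)) (hB : m ≤ (b.length : Int)) :
    weirdwalk_alt m a b
      = (((PySem.List.pyRange 0 m 1).filter (pvSem a b)).map
           (fun i => PySem.List.pyGetD a i 0)).sum := by
  unfold weirdwalk_alt
  have hmax : max m 0 = m := by omega
  rw [hmax]
  congr 1
  congr 1
  apply List.filter_congr
  intro i hi
  rcases (PySem.List.mem_pyRange_one).mp hi with ⟨h0, hlt⟩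
  have hsla : PySem.List.slice a none (some m) = a.take m.toNat := PySem.List.slice_to a hm
  have hslb : PySem.List.slice b none (some m) = b.take m.toNat := PySem.List.slice_to b hm
  have hlena : (a.take m.toNat).length = m.toNat := by
    rw [List.length_take]; omega
  have hlenb : (b.take m.toNat).length = m.toNat := by
    rw [List.length_take]; omega
  have hi' : i = ((i.toNat : Nat) : Int) := by omega
  rw [hsla, hslb, hi',
      pvTableGet (a.take m.toNat) i.toNat (by omega),
      pvTableGet (b.take m.toNat) i.toNat (by omega)]
  have hta : (a.take m.toNat).take i.toNat = a.take i.toNat := by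
    rw [List.take_take]; congr 1; omega
  have htb : (b.take m.toNat).take i.toNat = b.take i.toNat := by
    rw [List.take_take]; congr 1; omega
  rw [hta, htb]
  simp [pvSem, max_eq_left h0]

-- ===== VERDICT (by name: the statement is the Claim_ definition above) =====
theorem weirdwalk_spec : Claim_equal_weirdwalk := by
  intro n a b _ hPre
  unfold Spec_weirdwalk
  obtain ⟨h1p, h2p⟩ := hPre
  by_cases hn : n ≤ 0
  · have h1 : PySem.List.pyRange 0 n 1 = [] := PySem.List.pyRange_one_eq_nil (by omega)
    have hmax : max n 0 = 0 := by omega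
    unfold weirdwalk weirdwalk_alt
    rw [h1, hmax, PySem.List.pyRange_one_eq_nil (le_refl 0)]
    simp
  · have hM : n = ((n.toNat : Nat) : Int) := by omega
    rw [hM, pvAltEq a b _ (by omega) (by omega) (by omega)]
    unfold weirdwalk
    rw [pvFoldA a b n.toNat (by omega) (by omega)]
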